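-- pv_equiv track=rewrite | github.com/rmit-ir/NeurIPS-MMU-RAG | src/tools/retriever.py | _select_relevant_chunks
-- ===== SOURCE A (Python) =====
-- from typing import List, Dict, Any, Optional, Tuple
--
-- def _select_relevant_chunks(query: str, chunks: List[str], max_chunks: int = 3) -> List[str]:
--     """Select the most relevant chunks based on query similarity."""
--     if not chunks:
--         return []
--
--     # Simple relevance scoring based on keyword matching
--     query_words = set(query.lower().split())
--     scored_chunks = []
--
--     for chunk in chunks:
--         chunk_lower = chunk.lower()
--         score = sum(1 for word in query_words if word in chunk_lower)
--         scored_chunks.append((score, chunk))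
--
--     # Sort by score and return top chunks
--     scored_chunks.sort(key=lambda x: x[0], reverse=True)
--     return [chunk for score, chunk in scored_chunks[:max_chunks]]
-- ===== SOURCE B (Python) =====
-- def _select_relevant_chunks(query, chunks, max_chunks=3):
--     """Select the most relevant chunks via a counting/bucket sort on scores."""
--     if not chunks:
--         return []
--
--     query_words = set(query.lower().split())
--
--     # Bucket chunks by score (scores are bounded by len(query_words)),
--     # preserving original order inside each bucket.
--     buckets = {}
--     for chunk in chunks:
--         chunk_lower = chunk.lower()
--         score = sum(1 for word in query_words if word in chunk_lower)
--         buckets.setdefault(score, []).append(chunk)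
--
--     # Emit buckets from highest score down: no comparison sort needed.
--     ranked = []
--     for score in range(len(query_words), -1, -1):
--         ranked.extend(buckets.get(score, []))
--     return ranked[:max_chunks]
-- ===== Notes on version B (the rewrite author's own statement) =====
-- stated objective: alternative
-- what changed: Replaces A's comparison sort of (score, chunk) pairs by a counting/bucket sort: chunks are grouped into score buckets in one pass (scores are bounded by the number of query words) and the buckets are emitted from the highest score down before slicing off the top max_chunks.
import Mathlib
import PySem

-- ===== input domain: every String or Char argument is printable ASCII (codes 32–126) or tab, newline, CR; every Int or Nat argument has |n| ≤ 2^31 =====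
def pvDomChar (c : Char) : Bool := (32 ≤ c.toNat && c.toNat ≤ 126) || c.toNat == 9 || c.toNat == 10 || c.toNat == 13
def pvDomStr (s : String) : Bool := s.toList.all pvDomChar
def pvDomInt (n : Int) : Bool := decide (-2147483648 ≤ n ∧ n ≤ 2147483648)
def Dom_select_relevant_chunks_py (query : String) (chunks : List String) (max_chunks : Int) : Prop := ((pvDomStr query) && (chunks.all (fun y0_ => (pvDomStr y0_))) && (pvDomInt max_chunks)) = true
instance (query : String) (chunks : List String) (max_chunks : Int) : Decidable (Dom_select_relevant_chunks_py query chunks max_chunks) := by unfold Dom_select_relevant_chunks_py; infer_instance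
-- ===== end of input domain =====

-- B replaces A's comparison sort of (score, chunk) pairs by a counting/bucket sort:
-- chunks are grouped into score buckets in one pass and emitted from the highest
-- possible score down (objective: alternative algorithm; same return value).

-- ===== PORT A =====
def select_relevant_chunks_py (query : String) (chunks : List String) (max_chunks : Int) : List String :=
  if chunks = [] then []
  else
    let query_words : PySem.Set String := PySem.Set.ofList (PySem.Str.split₀ (PySem.Str.lower query))
    let scored_chunks : List (Int × String) := chunks.foldl (fun acc chunk =>
        let chunk_lower := PySem.Str.lower chunk
        let score : Int := query_words.foldl
          (fun n word => if PySem.Str.isIn word chunk_lower then n + 1 else n) 0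
        acc ++ [(score, chunk)]) []
    let sorted_chunks := PySem.List.sorted scored_chunks (fun x => x.1) true
    (PySem.List.slice sorted_chunks none (some max_chunks)).map (fun p => p.2)

-- ===== PORT B =====
def select_relevant_chunks_py_alt (query : String) (chunks : List String) (max_chunks : Int) : List String :=
  if chunks = [] then []
  else
    let query_words : PySem.Set String := PySem.Set.ofList (PySem.Str.split₀ (PySem.Str.lower query))
    let buckets : PySem.Dict Int (List String) := chunks.foldl (fun d chunk =>
        let chunk_lower := PySem.Str.lower chunk
        let score : Int := query_words.foldl
          (fun n word => if PySem.Str.isIn word chunk_lower then n + 1 else n) 0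
        d.modify score [] (fun b => b ++ [chunk])) PySem.Dict.empty
    let ranked : List String :=
      (PySem.List.pyRange (query_words.length : Int) (-1) (-1)).foldl
        (fun acc s => acc ++ buckets.getD s []) []
    PySem.List.slice ranked none (some max_chunks)

-- ===== PRECONDITION & SPEC =====
def Spec_select_relevant_chunks_py (query : String) (chunks : List String) (max_chunks : Int) (out : List String) : Prop := out = select_relevant_chunks_py_alt query chunks max_chunks
instance (query : String) (chunks : List String) (max_chunks : Int) (out : List String) : Decidable (Spec_select_relevant_chunks_py query chunks max_chunks out) := by unfold Spec_select_relevant_chunks_py; infer_instance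

-- ===== CLAIM (what is proved, stated in full; the proofs are below) =====
def Claim_equal_select_relevant_chunks_py : Prop := ∀ (query : String) (chunks : List String) (max_chunks : Int), Dom_select_relevant_chunks_py query chunks max_chunks → Spec_select_relevant_chunks_py query chunks max_chunks (select_relevant_chunks_py query chunks max_chunks)

-- ===== LEMMAS AND PROOFS =====

-- pyRange(n, -1, -1) is n, n-1, …, 0
lemma pyRange_desc (n : Nat) :
    PySem.List.pyRange (n:Int) (-1) (-1) = (List.range (n+1)).map (fun k : Nat => (n:Int) - (k:Int)) := by
  have h1 : ((-1:Int) < (n:Int)) := by omega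
  simp only [PySem.List.pyRange]
  norm_num [h1]
  intro a _; omega

-- concatenation of the scored pairs of l, bucketed by the scores in R (in R's order)
def bucketed (R : List Int) (l : List (Int × String)) : List (Int × String) :=
  R.flatMap (fun s => l.filter (fun p => p.1 == s))

lemma bucketed_nil (R : List Int) : bucketed R [] = [] := by simp [bucketed]

lemma bucketed_congr_of_not_mem (R : List Int) (l : List (Int × String)) (x : Int × String)
    (hx : x.1 ∉ R) : bucketed R (l ++ [x]) = bucketed R l := by
  unfold bucketed
  refine List.flatMap_congr ?_
  intro s hs
  have : (x.1 == s) = false := by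
    simp only [beq_eq_false_iff_ne]; rintro rfl; exact hx hs
  simp [List.filter_append, this]

lemma insertBy_all_true {α : Type} (before : α → α → Bool) (x : α) (zs : List α)
    (h : ∀ z ∈ zs, before x z = true) :
    PySem.List.insertBy before x zs = x :: zs := by
  cases zs with
  | nil => simp [PySem.List.insertBy]
  | cons y ys => simp [PySem.List.insertBy, h y (by simp)]

lemma insertBy_append_not {α : Type} (before : α → α → Bool) (x : α) (as bs : List α)
    (h : ∀ a ∈ as, before x a = false) :
    PySem.List.insertBy before x (as ++ bs) = as ++ PySem.List.insertBy before x bs := by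
  induction as with
  | nil => simp
  | cons a as ih =>
      simp only [List.cons_append, PySem.List.insertBy, h a (by simp)]
      simp only [Bool.false_eq_true, if_false]
      rw [ih (fun a ha => h a (by simp [ha]))]

lemma mem_bucketed_key {R : List Int} {l : List (Int × String)} {z : Int × String}
    (hz : z ∈ bucketed R l) : z.1 ∈ R := by
  unfold bucketed at hz
  rcases List.mem_flatMap.mp hz with ⟨s, hs, hzf⟩
  have := List.of_mem_filter hzf
  simp only [beq_iff_eq] at this
  rwa [this]

lemma insert_bucketed (R : List Int) (l : List (Int × String)) (x : Int × String)
    (hR : R.Pairwise (· > ·)) (hmem : x.1 ∈ R) :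
    PySem.List.insertBy (fun a b => decide (b.1 < a.1)) x (bucketed R l)
      = bucketed R (l ++ [x]) := by
  induction R with
  | nil => cases hmem
  | cons s R' ih =>
      rcases List.pairwise_cons.mp hR with ⟨hgt, hR'⟩
      have hsplit : bucketed (s :: R') l
          = l.filter (fun p => p.1 == s) ++ bucketed R' l := by simp [bucketed]
      rcases List.mem_cons.mp hmem with hxs | hxR'
      · -- x.1 = s : x passes its own bucket and lands right after it
        rw [hsplit, insertBy_append_not _ _ _ _ (by
          intro a ha
          have := List.of_mem_filter ha
          simp only [beq_iff_eq] at this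
          simp [this, hxs])]
        rw [insertBy_all_true _ _ _ (by
          intro z hz
          have hk := mem_bucketed_key hz
          have := hgt z.1 hk
          simp only [decide_eq_true_eq]
          omega)]
        have hnot : x.1 ∉ R' := by
          intro hx; exact absurd (hgt _ hx) (by simp [hxs])
        rw [bucketed_congr_of_not_mem R' l x hnot |>.symm]
        simp [bucketed, List.filter_append, hxs]
      · -- x.1 ∈ R' : x.1 < s, pass the s-bucket and recurse
        have hlt : x.1 < s := hgt _ hxR'
        rw [hsplit, insertBy_append_not _ _ _ _ (by
          intro a ha
          have := List.of_mem_filter ha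
          simp only [beq_iff_eq] at this
          simp only [decide_eq_false_iff_not, not_lt, this]
          omega)]
        rw [ih hR' hxR']
        have : (x.1 == s) = false := by
          simp only [beq_eq_false_iff_ne]; omega
        simp [bucketed, List.filter_append, this]

lemma sorted_eq_bucketed (R : List Int) (hR : R.Pairwise (· > ·))
    (l : List (Int × String)) (hl : ∀ p ∈ l, p.1 ∈ R) :
    PySem.List.sorted l (fun p => p.1) true = bucketed R l := by
  rw [PySem.List.sorted_rev_eq_foldl_insertBy]
  induction l using List.reverseRecOn with
  | nil => simp [bucketed_nil]
  | append_singleton l x ih =>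
      rw [List.foldl_append, List.foldl_cons, List.foldl_nil,
        ih (fun p hp => hl p (by simp [hp]))]
      exact insert_bucketed R l x hR (hl x (by simp))


-- xs[:b] commutes with map
lemma map_slice_to {α β : Type} (f : α → β) (xs : List α) (b : Int) :
    (PySem.List.slice xs none (some b)).map f
      = PySem.List.slice (xs.map f) none (some b) := by
  by_cases hb : 0 ≤ b
  · rw [PySem.List.slice_to _ hb, PySem.List.slice_to _ hb, List.map_take]
  · rcases Int.exists_eq_neg_ofNat (Int.le_of_lt (by omega : b < 0)) with ⟨k, rfl⟩
    have hk : 0 < k := by omega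
    rw [PySem.List.slice_to_neg_natCast _ _ hk, PySem.List.slice_to_neg_natCast _ _ hk,
      List.map_take, List.length_map]

-- the common core: A's sort-then-slice equals B's bucket-then-slice for any
-- score function f bounded by n
lemma core_eq (f : String → Int) (n : Nat) (hf : ∀ c, 0 ≤ f c ∧ f c ≤ (n:Int))
    (chunks : List String) (mc : Int) :
    (PySem.List.slice
        (PySem.List.sorted (chunks.foldl (fun acc c => acc ++ [(f c, c)]) [])
          (fun x => x.1) true) none (some mc)).map (fun p => p.2)
    = PySem.List.slice
        ((PySem.List.pyRange (n:Int) (-1) (-1)).foldl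
          (fun acc s => acc ++ (chunks.foldl
              (fun d c => d.modify (f c) [] (fun b => b ++ [c]))
              PySem.Dict.empty).getD s []) [])
        none (some mc) := by
  have hR : (List.range (n+1)).map (fun k : Nat => (n:Int) - (k:Int)) |>.Pairwise (· > ·) := by
    refine (List.pairwise_map).mpr ?_
    refine List.pairwise_lt_range.imp ?_
    intro a b hab; omega
  have hmem : ∀ c, f c ∈ (List.range (n+1)).map (fun k : Nat => (n:Int) - (k:Int)) := by
    intro c
    rcases hf c with ⟨h0, h1⟩
    refine List.mem_map.mpr ⟨((n:Int) - f c).toNat, ?_, ?_⟩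
    · exact List.mem_range.mpr (by omega)
    · omega
  have hA : chunks.foldl (fun acc c => acc ++ [(f c, c)]) []
      = chunks.map (fun c => (f c, c)) := by
    simpa using PySem.List.foldl_append_singleton_eq_map (fun c => (f c, c)) chunks []
  have hB : ∀ s : Int,
      (chunks.foldl (fun d c => d.modify (f c) [] (fun b => b ++ [c]))
        PySem.Dict.empty).getD s []
      = ((chunks.map (fun c => (f c, c))).filter (fun p => p.1 == s)).map (fun p => p.2) := by
    intro s
    rw [show (chunks.foldl (fun d c => d.modify (f c) [] (fun b => b ++ [c]))
          PySem.Dict.empty)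
        = (chunks.map (fun c => (f c, c))).foldl
            (fun d p => d.modify p.1 [] (fun b => b ++ [p.2])) PySem.Dict.empty from
      by rw [List.foldl_map]]
    simpa using PySem.Dict.getD_foldl_modify_append
      (chunks.map (fun c => (f c, c))) PySem.Dict.empty s
  rw [hA]
  rw [sorted_eq_bucketed ((List.range (n+1)).map (fun k : Nat => (n:Int) - (k:Int))) hR
    (chunks.map (fun c => (f c, c))) (by
      intro p hp
      rcases List.mem_map.mp hp with ⟨c, _, rfl⟩
      exact hmem c)]
  rw [map_slice_to]
  congr 1
  rw [PySem.List.foldl_append_eq_flatMap, pyRange_desc n]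
  rw [List.flatMap_congr (fun s _ => hB s)]
  rw [bucketed, List.map_flatMap]
  simp

-- ===== VERDICT (by name: the statement is the Claim_ definition above) =====
theorem select_relevant_chunks_py_spec : Claim_equal_select_relevant_chunks_py := by
  intro query chunks max_chunks _
  unfold Spec_select_relevant_chunks_py
  unfold select_relevant_chunks_py select_relevant_chunks_py_alt
  by_cases hc : chunks = []
  · simp [hc]
  · simp only [if_neg hc]
    have hf : ∀ c : String,
        (0:Int) ≤ (PySem.Set.ofList (PySem.Str.split₀ (PySem.Str.lower query))).foldl
          (fun n word => if PySem.Str.isIn word (PySem.Str.lower c) then n + 1 else n) 0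
        ∧ (PySem.Set.ofList (PySem.Str.split₀ (PySem.Str.lower query))).foldl
          (fun n word => if PySem.Str.isIn word (PySem.Str.lower c) then n + 1 else n) 0
          ≤ ((PySem.Set.ofList (PySem.Str.split₀ (PySem.Str.lower query))).length : Int) := by
      intro c
      rw [PySem.List.foldl_if_add_one
        (fun word => PySem.Str.isIn word (PySem.Str.lower c))
        (PySem.Set.ofList (PySem.Str.split₀ (PySem.Str.lower query))) 0]
      have := List.countP_le_length
        (p := fun word => PySem.Str.isIn word (PySem.Str.lower c))
        (l := PySem.Set.ofList (PySem.Str.split₀ (PySem.Str.lower query)))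
      omega
    exact core_eq _ _ hf chunks max_chunks
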